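-- pv_equiv track=rewrite | github.com/michelebanfi/surface-code | prova/michele.py | build_stabilizer_adjacency
-- ===== SOURCE A (Python) =====
-- from itertools import combinations
--
-- def build_stabilizer_adjacency(stabilizer_map):
--     """
--     Build adjacency list for stabilizers based on shared data qubits.
--     """
--     adjacency = {}
--     stabilizers = list(stabilizer_map.keys())
--     for s1, s2 in combinations(stabilizers, 2):
--         shared_qubits = set(stabilizer_map[s1]) & set(stabilizer_map[s2])
--         if len(shared_qubits) > 0:
--             adjacency.setdefault(s1, []).append(s2)
--             adjacency.setdefault(s2, []).append(s1)
--     return adjacency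
-- ===== SOURCE B (Python) =====
-- def build_stabilizer_adjacency(stabilizer_map):
--     """
--     Build adjacency list for stabilizers based on shared data qubits.
--     Inverted index: qubit -> stabilizers containing it; co-occurring pairs
--     are gathered into per-stabilizer neighbor sets and emitted in the order
--     the pairwise scan of A would first meet them.
--     """
--     items = list(stabilizer_map.items())
--     n = len(items)
--     qubit_to = {}
--     for i, (_, qs) in enumerate(items):
--         for q in dict.fromkeys(qs):
--             qubit_to.setdefault(q, []).append(i)
--     neighbors = [set() for _ in range(n)]
--     for idxs in qubit_to.values():
--         for a, j in enumerate(idxs):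
--             for i in idxs[:a]:
--                 neighbors[i].add(j)
--     adjacency = {}
--     for i in range(n):
--         for j in sorted(neighbors[i]):
--             adjacency.setdefault(items[i][0], []).append(items[j][0])
--             adjacency.setdefault(items[j][0], []).append(items[i][0])
--     return adjacency
-- ===== Notes on version B (the rewrite author's own statement) =====
-- stated objective: faster
-- what changed: A tests every stabilizer pair for a shared qubit via set intersection; B inverts the map into a qubit->stabilizer-indices index, collects co-occurring index pairs into per-stabilizer neighbor sets, and emits them in the same first-edge order, so no pairwise intersection test is ever done.
import Mathlib
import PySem

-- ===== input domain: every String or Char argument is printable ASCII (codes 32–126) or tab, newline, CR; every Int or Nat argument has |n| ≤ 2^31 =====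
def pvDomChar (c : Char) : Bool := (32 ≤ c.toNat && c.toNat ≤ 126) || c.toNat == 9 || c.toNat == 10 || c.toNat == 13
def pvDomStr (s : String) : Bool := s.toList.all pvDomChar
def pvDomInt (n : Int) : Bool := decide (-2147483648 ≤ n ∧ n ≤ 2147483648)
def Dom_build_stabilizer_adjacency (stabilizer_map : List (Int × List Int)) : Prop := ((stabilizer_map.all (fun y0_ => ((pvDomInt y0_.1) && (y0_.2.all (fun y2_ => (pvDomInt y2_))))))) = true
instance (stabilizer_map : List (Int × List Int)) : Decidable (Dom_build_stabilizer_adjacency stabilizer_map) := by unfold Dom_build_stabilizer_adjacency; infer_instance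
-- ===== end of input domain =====

-- B replaces A's all-pairs scan over stabilizers by a qubit → stabilizer inverted index whose
-- co-occurrence lists yield exactly the pairs that share a qubit; A = B is proved on all inputs.

-- ===== PORT A =====
-- 'adjacency.setdefault(s, []).append(t)' is ported as 'Dict.modify s [] (· ++ [t])' (same key
-- position and same value on every input).
def build_stabilizer_adjacency (stabilizer_map : List (Int × List Int)) : List (Int × List Int) :=
  let d := PySem.Dict.ofList stabilizer_map
  let stabilizers := d.keys
  let adjacency :=
    (PySem.List.combinations stabilizers 2).foldl
      (fun adj c =>
        match c with
        | [s1, s2] =>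
          let shared := PySem.Set.inter (PySem.Set.ofList (d.getD s1 [])) (PySem.Set.ofList (d.getD s2 []))
          if 0 < shared.length then
            ((adj.modify s1 [] (· ++ [s2])).modify s2 [] (· ++ [s1]))
          else adj
        | _ => adj)
      PySem.Dict.empty
  adjacency.items

-- ===== PORT B =====
def build_stabilizer_adjacency_alt (stabilizer_map : List (Int × List Int)) : List (Int × List Int) :=
  let items := (PySem.Dict.ofList stabilizer_map).items
  let n : Int := items.length
  let qubit_to : PySem.Dict Int (List Int) :=
    (PySem.List.enumerate items).foldl
      (fun qt iq =>
        (PySem.List.dedup iq.2.2).foldl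
          (fun qt q => qt.insert q (qt.getD q [] ++ [iq.1]))
          qt)
      PySem.Dict.empty
  let neighbors : List (PySem.Set Int) := List.replicate items.length PySem.Set.empty
  let neighbors :=
    qubit_to.values.foldl
      (fun nb idxs =>
        (PySem.List.enumerate idxs).foldl
          (fun nb aj =>
            (PySem.List.slice idxs none (some aj.1)).foldl
              (fun nb i => PySem.List.pySetD nb i (PySem.Set.add (PySem.List.pyGetD nb i PySem.Set.empty) aj.2))
              nb)
          nb)
      neighbors
  let adjacency :=
    (PySem.List.pyRange 0 n 1).foldl
      (fun adj i =>
        (PySem.List.sorted (PySem.List.pyGetD neighbors i PySem.Set.empty) (fun x => x) false).foldl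
          (fun adj j =>
            ((adj.modify (PySem.List.pyGetD items i (0, [])).1 [] (· ++ [(PySem.List.pyGetD items j (0, [])).1])).modify
              (PySem.List.pyGetD items j (0, [])).1 [] (· ++ [(PySem.List.pyGetD items i (0, [])).1])))
          adj)
      (PySem.Dict.empty : PySem.Dict Int (List Int))
  adjacency.items

-- ===== PRECONDITION & SPEC =====
def Spec_build_stabilizer_adjacency (stabilizer_map : List (Int × List Int)) (out : List (Int × List Int)) : Prop := out = build_stabilizer_adjacency_alt stabilizer_map
instance (stabilizer_map : List (Int × List Int)) (out : List (Int × List Int)) : Decidable (Spec_build_stabilizer_adjacency stabilizer_map out) := by unfold Spec_build_stabilizer_adjacency; infer_instance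

-- ===== CLAIM (what is proved, stated in full; the proofs are below) =====
def Claim_equal_build_stabilizer_adjacency : Prop := ∀ (stabilizer_map : List (Int × List Int)), Dom_build_stabilizer_adjacency stabilizer_map → Spec_build_stabilizer_adjacency stabilizer_map (build_stabilizer_adjacency stabilizer_map)

-- ===== LEMMAS AND PROOFS =====

def pvTest (v1 v2 : List Int) : Bool :=
  decide (0 < (PySem.Set.inter (PySem.Set.ofList v1) (PySem.Set.ofList v2)).length)

def pvPairs {α : Type} : List α → List (α × α)
  | [] => []
  | x :: xs => xs.map (fun y => (x, y)) ++ pvPairs xs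

lemma pvTest_iff (v1 v2 : List Int) : pvTest v1 v2 = true ↔ ∃ q, q ∈ v1 ∧ q ∈ v2 := by
  simp only [pvTest, decide_eq_true_eq, List.length_pos_iff_exists_mem]
  constructor
  · rintro ⟨q, hq⟩
    have := (PySem.Set.mem_inter (PySem.Set.ofList v1) (PySem.Set.ofList v2) q).mp hq
    exact ⟨q, by simpa [PySem.Set.mem_ofList] using this⟩
  · rintro ⟨q, h1, h2⟩
    refine ⟨q, (PySem.Set.mem_inter (PySem.Set.ofList v1) (PySem.Set.ofList v2) q).mpr ?_⟩
    exact ⟨by simpa [PySem.Set.mem_ofList], by simpa [PySem.Set.mem_ofList]⟩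

lemma comb2 {α : Type} (l : List α) :
    PySem.List.combinations l 2 = (pvPairs l).map (fun p => [p.1, p.2]) := by
  induction l with
  | nil => simp [pvPairs, PySem.List.combinations_nil_succ]
  | cons x xs ih =>
    rw [show (2:Nat) = 1 + 1 from rfl, PySem.List.combinations_cons_succ, PySem.List.combinations_one]
    simp [pvPairs, ih, List.map_map, Function.comp_def]

lemma pvPairs_map {α β : Type} (f : α → β) (l : List α) :
    pvPairs (l.map f) = (pvPairs l).map (fun p => (f p.1, f p.2)) := by
  induction l with
  | nil => simp [pvPairs]
  | cons x xs ih => simp [pvPairs, ih, List.map_map, Function.comp_def]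

lemma mem_pvPairs {α : Type} {l : List α} {p : α × α} (h : p ∈ pvPairs l) : p.1 ∈ l ∧ p.2 ∈ l := by
  induction l with
  | nil => simp [pvPairs] at h
  | cons x xs ih =>
    simp only [pvPairs, List.mem_append, List.mem_map] at h
    rcases h with ⟨y, hy, rfl⟩ | h
    · exact ⟨by simp, by simp [hy]⟩
    · obtain ⟨h1, h2⟩ := ih h
      exact ⟨by simp [h1], by simp [h2]⟩

lemma range_map_getD {α : Type} (l : List α) (d : α) :
    (List.range l.length).map (fun i => l.getD i d) = l := by
  apply List.ext_getElem <;> simp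
  intro i hi _
  exact List.getD_eq_getElem l d hi

lemma pvPairs_eq_flatMap (l : List Nat) (h : l.Pairwise (· < ·)) :
    pvPairs l = l.flatMap (fun i => (l.filter (fun j => decide (i < j))).map (fun j => (i, j))) := by
  induction l with
  | nil => simp [pvPairs]
  | cons x xs ih =>
    have hx : ∀ y ∈ xs, x < y := fun y hy => List.rel_of_pairwise_cons h hy
    have htail : xs.Pairwise (· < ·) := h.of_cons
    simp only [pvPairs, List.flatMap_cons]
    congr 1
    · rw [List.filter_cons]
      simp only [lt_irrefl, decide_false, Bool.false_eq_true, if_false]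
      rw [List.filter_eq_self.mpr (fun y hy => by simpa using hx y hy)]
    · rw [ih htail]
      apply List.flatMap_congr
      intro i hi
      rw [List.filter_cons]
      have : ¬ (i < x) := by have := hx i hi; omega
      simp [this]

def pvVal (l : List (Int × List Int)) (i : Nat) : List Int := (l.getD i (0, [])).2
def pvKey (l : List (Int × List Int)) (i : Nat) : Int := (l.getD i (0, [])).1

def pvStep (l : List (Int × List Int)) (adj : PySem.Dict Int (List Int)) (p : Nat × Nat) : PySem.Dict Int (List Int) :=
  (adj.modify (pvKey l p.1) [] (· ++ [pvKey l p.2])).modify (pvKey l p.2) [] (· ++ [pvKey l p.1])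

def pvE (l : List (Int × List Int)) : List (Nat × Nat) :=
  (pvPairs (List.range l.length)).filter (fun p => pvTest (pvVal l p.1) (pvVal l p.2))

lemma A_eq_canon (d : PySem.Dict Int (List Int)) (hd : d.keys.Nodup) :
    (PySem.List.combinations d.keys 2).foldl
      (fun adj c =>
        match c with
        | [s1, s2] =>
          let shared := PySem.Set.inter (PySem.Set.ofList (d.getD s1 [])) (PySem.Set.ofList (d.getD s2 []))
          if 0 < shared.length then
            ((adj.modify s1 [] (· ++ [s2])).modify s2 [] (· ++ [s1]))
          else adj
        | _ => adj)
      PySem.Dict.empty = (pvE d.items).foldl (pvStep d.items) PySem.Dict.empty := by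
  have hlen : d.keys.length = d.items.length := by
    simp [PySem.Dict.keys]
  have hkey : ∀ i : Nat, i < d.items.length → d.keys.getD i 0 = pvKey d.items i := by
    intro i hi
    rw [List.getD_eq_getElem _ _ (by omega : i < d.keys.length)]
    rw [pvKey, List.getD_eq_getElem _ _ hi]
    simp [PySem.Dict.keys]
  have hval : ∀ i : Nat, i < d.items.length → d.getD (pvKey d.items i) [] = pvVal d.items i := by
    intro i hi
    have hmem : (pvKey d.items i, pvVal d.items i) ∈ d.items := by
      rw [pvKey, pvVal, List.getD_eq_getElem _ _ hi]
      simp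
    exact PySem.Dict.getD_of_mem_items d hmem hd []
  rw [comb2, List.foldl_map]
  have hred : (fun (adj : PySem.Dict Int (List Int)) (p : Int × Int) =>
      (fun adj c =>
        match c with
        | [s1, s2] =>
          let shared := PySem.Set.inter (PySem.Set.ofList (d.getD s1 [])) (PySem.Set.ofList (d.getD s2 []))
          if 0 < shared.length then
            ((adj.modify s1 [] (· ++ [s2])).modify s2 [] (· ++ [s1]))
          else adj
        | _ => adj) adj [p.1, p.2])
      = (fun adj p =>
          if 0 < (PySem.Set.inter (PySem.Set.ofList (d.getD p.1 [])) (PySem.Set.ofList (d.getD p.2 []))).length then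
            ((adj.modify p.1 [] (· ++ [p.2])).modify p.2 [] (· ++ [p.1]))
          else adj) := rfl
  rw [hred, PySem.List.foldl_ite_eq_foldl_filter]
  conv_lhs => rw [show d.keys = (List.range d.keys.length).map (fun i => d.keys.getD i 0) from (range_map_getD _ _).symm]
  rw [pvPairs_map, List.filter_map, List.foldl_map, hlen]
  rw [pvE]
  rw [List.filter_congr (q := fun p => pvTest (pvVal d.items p.1) (pvVal d.items p.2)) ?hfc]
  case hfc =>
    intro p hp
    obtain ⟨h1, h2⟩ := mem_pvPairs hp
    simp only [List.mem_range] at h1 h2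
    simp only [Function.comp, hkey p.1 h1, hkey p.2 h2, hval p.1 h1, hval p.2 h2, pvTest]
  apply PySem.List.foldl_congr_mem
  intro adj p hp
  have hp' := List.mem_of_mem_filter hp
  obtain ⟨h1, h2⟩ := mem_pvPairs hp'
  simp only [List.mem_range] at h1 h2
  simp only [hkey p.1 h1, hkey p.2 h2, pvStep]

lemma qt_inner (m : List Int) (hm : m.Nodup) (qt : PySem.Dict Int (List Int)) (t : Int) (q : Int) :
    (m.foldl (fun qt q' => qt.insert q' (qt.getD q' [] ++ [t])) qt).getD q []
      = if q ∈ m then qt.getD q [] ++ [t] else qt.getD q [] := by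
  induction m generalizing qt with
  | nil => simp
  | cons q1 m1 ih =>
    have h1 : q1 ∉ m1 := (List.nodup_cons.mp hm).1
    rw [List.foldl_cons, ih (List.nodup_cons.mp hm).2]
    by_cases hq : q ∈ m1
    · have hne : q ≠ q1 := fun h => h1 (h ▸ hq)
      simp [hq, PySem.Dict.getD_insert, hne, List.mem_cons]
    · by_cases hq1 : q = q1
      · subst hq1
        simp [hq]
      · simp [hq, PySem.Dict.getD_insert, hq1, List.mem_cons]

lemma qt_getD (E : List (Int × (Int × List Int))) (qt0 : PySem.Dict Int (List Int)) (q : Int) :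
    (E.foldl
        (fun qt iq =>
          (PySem.List.dedup iq.2.2).foldl (fun qt q' => qt.insert q' (qt.getD q' [] ++ [iq.1])) qt)
        qt0).getD q []
      = qt0.getD q [] ++ (E.filter (fun iq => decide (q ∈ iq.2.2))).map (·.1) := by
  induction E generalizing qt0 with
  | nil => simp
  | cons iq E ih =>
    rw [List.foldl_cons, ih, qt_inner _ (PySem.List.nodup_dedup _), List.filter_cons]
    by_cases hq : q ∈ iq.2.2
    · simp [hq]
    · simp [hq]

lemma qt_keys_mem (E : List (Int × (Int × List Int))) (qt0 : PySem.Dict Int (List Int)) (q : Int) :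
    (q ∈ (E.foldl
        (fun qt iq =>
          (PySem.List.dedup iq.2.2).foldl (fun qt q' => qt.insert q' (qt.getD q' [] ++ [iq.1])) qt)
        qt0).keys)
      ↔ q ∈ qt0.keys ∨ ∃ iq ∈ E, q ∈ iq.2.2 := by
  induction E generalizing qt0 with
  | nil => simp
  | cons iq E ih =>
    rw [List.foldl_cons, ih]
    rw [PySem.Dict.keys_foldl_insert]
    simp only [PySem.Set.mem_update, PySem.List.mem_dedup, List.mem_cons]
    constructor
    · rintro (⟨h | h⟩ | h)
      · exact Or.inl h
      · exact Or.inr ⟨iq, Or.inl rfl, h⟩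
      · obtain ⟨a, ha, hq⟩ := h
        exact Or.inr ⟨a, Or.inr ha, hq⟩
    · rintro (h | ⟨a, (rfl | ha), hq⟩)
      · exact Or.inl (Or.inl h)
      · exact Or.inl (Or.inr hq)
      · exact Or.inr ⟨a, ha, hq⟩

lemma qt_keys_nodup (E : List (Int × (Int × List Int))) (qt0 : PySem.Dict Int (List Int))
    (h0 : qt0.keys.Nodup) :
    (E.foldl
        (fun qt iq =>
          (PySem.List.dedup iq.2.2).foldl (fun qt q' => qt.insert q' (qt.getD q' [] ++ [iq.1])) qt)
        qt0).keys.Nodup := by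
  induction E generalizing qt0 with
  | nil => exact h0
  | cons iq E ih =>
    exact ih _ (PySem.Dict.nodup_keys_foldl_insert _ _ _ h0)

def pvPairsOf (m : List Int) : List (Int × Int) :=
  (PySem.List.enumerate m).flatMap
    (fun aj => (PySem.List.slice m none (some aj.1)).map (fun i => (i, aj.2)))

lemma mem_pvPairsOf (m : List Int) (hm : m.Pairwise (· < ·)) (i j : Int) :
    (i, j) ∈ pvPairsOf m ↔ i ∈ m ∧ j ∈ m ∧ i < j := by
  rw [pvPairsOf, List.mem_flatMap]
  constructor
  · rintro ⟨aj, haj, hmem⟩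
    obtain ⟨k, hk, rfl⟩ := (PySem.List.mem_enumerate_iff m 0 aj).mp haj
    simp only [List.mem_map] at hmem
    obtain ⟨i', hi', hpair⟩ := hmem
    obtain ⟨rfl, rfl⟩ : i' = i ∧ m[k] = j := by
      constructor <;> [exact congrArg Prod.fst hpair; exact congrArg Prod.snd hpair]
    norm_num at hi'
    obtain ⟨a, ha, rfl⟩ := List.mem_take_iff_getElem.mp hi'
    have halt : a < k := lt_of_lt_of_le ha (min_le_left _ _)
    have ham : a < m.length := lt_of_lt_of_le ha (min_le_right _ _)
    refine ⟨List.getElem_mem ham, List.getElem_mem hk, ?_⟩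
    exact List.pairwise_iff_getElem.mp hm a k ham hk halt
  · rintro ⟨hi, hj, hij⟩
    obtain ⟨a, ham, rfl⟩ := List.getElem_of_mem hi
    obtain ⟨k, hk, rfl⟩ := List.getElem_of_mem hj
    have hak : a < k := by
      rcases lt_trichotomy a k with h | h | h
      · exact h
      · subst h; omega
      · exact absurd (List.pairwise_iff_getElem.mp hm k a hk ham h) (by omega)
    refine ⟨((k : Int), m[k]), (PySem.List.mem_enumerate_iff m 0 _).mpr ⟨k, hk, by simp⟩, ?_⟩
    simp only [List.mem_map]
    refine ⟨m[a], ?_, rfl⟩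
    rw [PySem.List.slice_to m (Int.natCast_nonneg k), Int.toNat_natCast]
    rw [List.mem_take_iff_getElem]
    exact ⟨a, by omega, rfl⟩

lemma pyGetD_mem_or_default {α : Type} (xs : List α) (i : Int) (d : α) :
    PySem.List.pyGetD xs i d ∈ xs ∨ PySem.List.pyGetD xs i d = d := by
  unfold PySem.List.pyGetD
  cases h : PySem.List.pyGet? xs i with
  | none => simp
  | some v => exact Or.inl (by simpa using PySem.List.mem_of_pyGet?_eq_some xs h)

lemma nb_upds_getD (L : List (Int × Int)) (nb : List (PySem.Set Int))
    (hL : ∀ p ∈ L, 0 ≤ p.1 ∧ p.1.toNat < nb.length) (i : Int) (hi : 0 ≤ i) (x : Int) :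
    (x ∈ PySem.List.pyGetD
        (L.foldl
          (fun nb p => PySem.List.pySetD nb p.1 (PySem.Set.add (PySem.List.pyGetD nb p.1 PySem.Set.empty) p.2))
          nb) i PySem.Set.empty)
      ↔ x ∈ PySem.List.pyGetD nb i PySem.Set.empty ∨ (i, x) ∈ L := by
  induction L generalizing nb with
  | nil => simp
  | cons p L ih =>
    obtain ⟨hp0, hplen⟩ := hL p (List.mem_cons_self)
    obtain ⟨a, ha⟩ : ∃ a : Nat, p.1 = (a : Int) := ⟨p.1.toNat, (Int.toNat_of_nonneg hp0).symm⟩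
    obtain ⟨b, rfl⟩ : ∃ b : Nat, i = (b : Int) := ⟨i.toNat, (Int.toNat_of_nonneg hi).symm⟩
    rw [List.foldl_cons, ih _ ?hL']
    case hL' =>
      intro r hr
      have := hL r (List.mem_cons_of_mem _ hr)
      rwa [PySem.List.length_pySetD]
    rw [ha] at hplen ⊢
    rw [Int.toNat_natCast] at hplen
    rw [PySem.List.pyGetD_pySetD_natCast nb a b _ _ hplen]
    obtain ⟨p1, p2⟩ := p
    simp only at ha
    subst ha
    by_cases hip : b = a
    · subst hip
      rw [if_pos rfl]
      simp only [PySem.Set.mem_add, List.mem_cons, Prod.mk.injEq]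
      constructor
      · rintro ((h | rfl) | h)
        · exact Or.inl h
        · exact Or.inr (Or.inl (by simp))
        · exact Or.inr (Or.inr h)
      · rintro (h | ⟨-, rfl⟩ | h)
        · exact Or.inl (Or.inl h)
        · exact Or.inl (Or.inr rfl)
        · exact Or.inr h
    · rw [if_neg hip]
      simp only [List.mem_cons, Prod.mk.injEq, Nat.cast_inj]
      constructor
      · rintro (h | h)
        · exact Or.inl h
        · exact Or.inr (Or.inr h)
      · rintro (h | ⟨hc, -⟩ | h)
        · exact Or.inl h
        · exact absurd hc hip
        · exact Or.inr h

lemma nb_upds_sets_nodup (L : List (Int × Int)) (nb : List (PySem.Set Int))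
    (hL : ∀ p ∈ L, 0 ≤ p.1)
    (hnb : ∀ s ∈ nb, s.Nodup) :
    ∀ s ∈ (L.foldl
        (fun nb p => PySem.List.pySetD nb p.1 (PySem.Set.add (PySem.List.pyGetD nb p.1 PySem.Set.empty) p.2))
        nb), s.Nodup := by
  induction L generalizing nb with
  | nil => exact hnb
  | cons p L ih =>
    rw [List.foldl_cons]
    apply ih _ (fun r hr => hL r (List.mem_cons_of_mem _ hr))
    intro s hs
    rw [PySem.List.pySetD_of_nonneg _ _ (hL p List.mem_cons_self)] at hs
    rcases List.mem_or_eq_of_mem_set hs with h | rfl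
    · exact hnb s h
    · rcases pyGetD_mem_or_default nb p.1 PySem.Set.empty with h | h
      · exact PySem.Set.nodup_add _ _ (hnb _ h)
      · rw [h]
        exact PySem.Set.nodup_add _ _ List.nodup_nil

def pvIdxL (l : List (Int × List Int)) (q : Int) : List Int :=
  (PySem.List.pyRange 0 (l.length : Int) 1).filter
    (fun j => decide (q ∈ (PySem.List.pyGetD l j (0, [])).2))

lemma pvIdxL_pairwise (l : List (Int × List Int)) (q : Int) : (pvIdxL l q).Pairwise (· < ·) :=
  (PySem.List.pairwise_lt_pyRange_one 0 (l.length : Int)).filter _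

lemma mem_pvIdxL (l : List (Int × List Int)) (q j : Int) :
    j ∈ pvIdxL l q ↔ (0 ≤ j ∧ j < (l.length : Int)) ∧ q ∈ (PySem.List.pyGetD l j (0, [])).2 := by
  simp [pvIdxL, List.mem_filter, PySem.List.mem_pyRange_one]

def pvCanon (l : List (Int × List Int)) : List (Int × List Int) :=
  ((pvE l).foldl (pvStep l) PySem.Dict.empty).items

lemma B_eq_canon (l : List (Int × List Int)) :
    (let items := l
     let n : Int := items.length
     let qubit_to : PySem.Dict Int (List Int) :=
       (PySem.List.enumerate items).foldl
         (fun qt iq =>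
           (PySem.List.dedup iq.2.2).foldl
             (fun qt q => qt.insert q (qt.getD q [] ++ [iq.1]))
             qt)
         PySem.Dict.empty
     let neighbors : List (PySem.Set Int) := List.replicate items.length PySem.Set.empty
     let neighbors :=
       qubit_to.values.foldl
         (fun nb idxs =>
           (PySem.List.enumerate idxs).foldl
             (fun nb aj =>
               (PySem.List.slice idxs none (some aj.1)).foldl
                 (fun nb i => PySem.List.pySetD nb i (PySem.Set.add (PySem.List.pyGetD nb i PySem.Set.empty) aj.2))
                 nb)
             nb)
         neighbors
     let adjacency :=
       (PySem.List.pyRange 0 n 1).foldl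
         (fun adj i =>
           (PySem.List.sorted (PySem.List.pyGetD neighbors i PySem.Set.empty) (fun x => x) false).foldl
             (fun adj j =>
               ((adj.modify (PySem.List.pyGetD items i (0, [])).1 [] (· ++ [(PySem.List.pyGetD items j (0, [])).1])).modify
                 (PySem.List.pyGetD items j (0, [])).1 [] (· ++ [(PySem.List.pyGetD items i (0, [])).1])))
             adj)
         (PySem.Dict.empty : PySem.Dict Int (List Int))
     adjacency.items) = pvCanon l := by
  simp only []
  set qt : PySem.Dict Int (List Int) :=
    (PySem.List.enumerate l).foldl
      (fun qt iq =>
        (PySem.List.dedup iq.2.2).foldl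
          (fun qt q => qt.insert q (qt.getD q [] ++ [iq.1]))
          qt)
      PySem.Dict.empty with hqt
  -- the inverted index holds, per qubit q, the indices whose qubit list contains q
  have hqt_getD : ∀ q : Int, qt.getD q [] = pvIdxL l q := by
    intro q
    rw [hqt, qt_getD, PySem.Dict.getD_empty, List.nil_append]
    rw [PySem.List.enumerate_eq_map_pyRange l (0, []), List.filter_map, List.map_map]
    simp [pvIdxL, Function.comp_def]
  have hqt_nodup : qt.keys.Nodup := qt_keys_nodup _ _ (by simp)
  have hvalues : qt.values = qt.keys.map (fun q => pvIdxL l q) := by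
    rw [PySem.Dict.values_eq_map_keys qt hqt_nodup []]
    exact List.map_congr_left (fun q _ => hqt_getD q)
  -- flatten the bucket-scanning loops into one fold over index pairs
  set nbF : List (PySem.Set Int) :=
    qt.values.foldl
      (fun nb idxs =>
        (PySem.List.enumerate idxs).foldl
          (fun nb aj =>
            (PySem.List.slice idxs none (some aj.1)).foldl
              (fun nb i => PySem.List.pySetD nb i (PySem.Set.add (PySem.List.pyGetD nb i PySem.Set.empty) aj.2))
              nb)
          nb)
      (List.replicate l.length PySem.Set.empty) with hnbF
  set bigL : List (Int × Int) := qt.values.flatMap pvPairsOf with hbigL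
  have hflat : nbF =
      bigL.foldl
        (fun nb p => PySem.List.pySetD nb p.1 (PySem.Set.add (PySem.List.pyGetD nb p.1 PySem.Set.empty) p.2))
        (List.replicate l.length PySem.Set.empty) := by
    rw [hnbF, hbigL, List.foldl_flatMap]
    apply PySem.List.foldl_congr_mem
    intro nb idxs _
    rw [pvPairsOf, List.foldl_flatMap]
    apply PySem.List.foldl_congr_mem
    intro nb' aj _
    rw [List.foldl_map]
  have hmem_values : ∀ idxs ∈ qt.values, ∃ q, idxs = pvIdxL l q := by
    intro idxs h
    rw [hvalues] at h
    obtain ⟨q, -, rfl⟩ := List.mem_map.mp h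
    exact ⟨q, rfl⟩
  have hbound : ∀ p ∈ bigL, 0 ≤ p.1 ∧ p.1.toNat < l.length := by
    intro p hp
    obtain ⟨idxs, hidxs, hpmem⟩ := List.mem_flatMap.mp hp
    obtain ⟨q, rfl⟩ := hmem_values idxs hidxs
    obtain ⟨h1, -, -⟩ := (mem_pvPairsOf _ (pvIdxL_pairwise l q) p.1 p.2).mp (by simpa using hpmem)
    obtain ⟨⟨ha, hb⟩, -⟩ := (mem_pvIdxL l q p.1).mp h1
    exact ⟨ha, by omega⟩
  -- membership in bigL ↔ the two indices share a qubit
  have hbigL_mem : ∀ i j : Int, (i, j) ∈ bigL ↔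
      ((0 ≤ i ∧ i < (l.length : Int)) ∧ (0 ≤ j ∧ j < (l.length : Int)) ∧ i < j ∧
        ∃ q, q ∈ (PySem.List.pyGetD l i (0, [])).2 ∧ q ∈ (PySem.List.pyGetD l j (0, [])).2) := by
    intro i j
    rw [hbigL, List.mem_flatMap]
    constructor
    · rintro ⟨idxs, hidxs, hpmem⟩
      obtain ⟨q, rfl⟩ := hmem_values idxs hidxs
      obtain ⟨h1, h2, hij⟩ := (mem_pvPairsOf _ (pvIdxL_pairwise l q) i j).mp hpmem
      obtain ⟨hr1, hq1⟩ := (mem_pvIdxL l q i).mp h1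
      obtain ⟨hr2, hq2⟩ := (mem_pvIdxL l q j).mp h2
      exact ⟨hr1, hr2, hij, q, hq1, hq2⟩
    · rintro ⟨hr1, hr2, hij, q, hq1, hq2⟩
      refine ⟨pvIdxL l q, ?_, ?_⟩
      · rw [hvalues, List.mem_map]
        refine ⟨q, ?_, rfl⟩
        rw [hqt, qt_keys_mem]
        refine Or.inr ⟨((i : Int), PySem.List.pyGetD l i (0, [])), ?_, hq1⟩
        rw [PySem.List.enumerate_eq_map_pyRange l (0, []), List.mem_map]
        exact ⟨i, PySem.List.mem_pyRange_one.mpr (by simpa using hr1), rfl⟩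
      · rw [mem_pvPairsOf _ (pvIdxL_pairwise l q), mem_pvIdxL, mem_pvIdxL]
        exact ⟨⟨hr1, hq1⟩, ⟨hr2, hq2⟩, hij⟩
  -- characterize each final neighbor set
  have hnb0 : ∀ i : Int, PySem.List.pyGetD (List.replicate l.length (PySem.Set.empty : PySem.Set Int)) i PySem.Set.empty = PySem.Set.empty := by
    intro i
    rcases pyGetD_mem_or_default (List.replicate l.length (PySem.Set.empty : PySem.Set Int)) i PySem.Set.empty with h | h
    · exact List.eq_of_mem_replicate h
    · exact h
  have hnbF_mem : ∀ i : Int, 0 ≤ i → ∀ x : Int, (x ∈ PySem.List.pyGetD nbF i PySem.Set.empty) ↔ (i, x) ∈ bigL := by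
    intro i hi x
    rw [hflat, nb_upds_getD _ _ (by simpa using hbound) i hi x, hnb0]
    simp [PySem.Set.empty]
  have hnbF_nodup : ∀ i : Int, (PySem.List.pyGetD nbF i PySem.Set.empty).Nodup := by
    intro i
    rcases pyGetD_mem_or_default nbF i PySem.Set.empty with h | h
    · rw [hflat] at h ⊢
      exact nb_upds_sets_nodup _ _ (fun p hp => (hbound p hp).1) (fun s hs => (List.eq_of_mem_replicate hs) ▸ List.nodup_nil) _ h
    · rw [h]
      exact List.nodup_nil
  -- each sorted neighbor set is the increasing list of matching larger indices
  have hsorted : ∀ i : Int, 0 ≤ i →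
      PySem.List.sorted (PySem.List.pyGetD nbF i PySem.Set.empty) (fun x => x) false
        = (PySem.List.pyRange 0 (l.length : Int) 1).filter
            (fun j => decide (i < j) && pvTest (PySem.List.pyGetD l i (0, [])).2 (PySem.List.pyGetD l j (0, [])).2) := by
    intro i hi
    apply PySem.List.sorted_eq_of_perm_of_pairwise_lt
    · rw [List.perm_ext_iff_of_nodup (((PySem.List.pairwise_lt_pyRange_one 0 (l.length : Int)).filter _).nodup) (hnbF_nodup i)]
      intro j
      rw [hnbF_mem i hi j, hbigL_mem i j]
      rw [List.mem_filter, PySem.List.mem_pyRange_one]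
      rw [Bool.and_eq_true, decide_eq_true_eq, pvTest_iff]
      constructor
      · rintro ⟨⟨h0, hn⟩, hij, hq⟩
        exact ⟨⟨hi, lt_trans hij hn⟩, ⟨h0, hn⟩, hij, hq⟩
      · rintro ⟨-, hr2, hij, hq⟩
        exact ⟨hr2, hij, hq⟩
    · exact (PySem.List.pairwise_lt_pyRange_one 0 (l.length : Int)).filter _
  -- rewrite the output loop over the canonical edge list
  have houter :
      (PySem.List.pyRange 0 (l.length : Int) 1).foldl
        (fun adj i =>
          (PySem.List.sorted (PySem.List.pyGetD nbF i PySem.Set.empty) (fun x => x) false).foldl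
            (fun adj j =>
              ((adj.modify (PySem.List.pyGetD l i (0, [])).1 [] (· ++ [(PySem.List.pyGetD l j (0, [])).1])).modify
                (PySem.List.pyGetD l j (0, [])).1 [] (· ++ [(PySem.List.pyGetD l i (0, [])).1])))
            adj)
        (PySem.Dict.empty : PySem.Dict Int (List Int))
      = ((PySem.List.pyRange 0 (l.length : Int) 1).flatMap
          (fun i =>
            ((PySem.List.pyRange 0 (l.length : Int) 1).filter
              (fun j => decide (i < j) && pvTest (PySem.List.pyGetD l i (0, [])).2 (PySem.List.pyGetD l j (0, [])).2)).map
              (fun j => (i, j)))).foldl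
          (fun adj p =>
            ((adj.modify (PySem.List.pyGetD l p.1 (0, [])).1 [] (· ++ [(PySem.List.pyGetD l p.2 (0, [])).1])).modify
              (PySem.List.pyGetD l p.2 (0, [])).1 [] (· ++ [(PySem.List.pyGetD l p.1 (0, [])).1])))
          (PySem.Dict.empty : PySem.Dict Int (List Int)) := by
    rw [List.foldl_flatMap]
    apply PySem.List.foldl_congr_mem
    intro adj i hi
    rw [hsorted i (PySem.List.mem_pyRange_one.mp hi).1, List.foldl_map]
  rw [houter]
  -- push the Int casts down to the canonical Nat-indexed edge list
  have hrange : PySem.List.pyRange 0 (l.length : Int) 1 = List.map (fun k : Nat => (k : Int)) (List.range l.length) := by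
    rw [PySem.List.pyRange_one]
    simp only [sub_zero, Int.toNat_natCast, zero_add]
  have hfilterZ : ∀ a : Nat,
      ((List.map (fun k : Nat => (k : Int)) (List.range l.length)).filter
        (fun j => decide ((a : Int) < j) && pvTest (PySem.List.pyGetD l (a : Int) (0, [])).2 (PySem.List.pyGetD l j (0, [])).2))
      = ((List.range l.length).filter (fun b => decide (a < b) && pvTest (pvVal l a) (pvVal l b)) : List Nat).map (fun b : Nat => (b : Int)) := by
    intro a
    rw [List.filter_map]
    congr 1
    apply List.filter_congr
    intro b _
    simp [PySem.List.pyGetD_natCast, pvVal, Nat.cast_lt]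
  have hbigE :
      ((PySem.List.pyRange 0 (l.length : Int) 1).flatMap
        (fun i =>
          ((PySem.List.pyRange 0 (l.length : Int) 1).filter
            (fun j => decide (i < j) && pvTest (PySem.List.pyGetD l i (0, [])).2 (PySem.List.pyGetD l j (0, [])).2)).map
            (fun j => (i, j))))
      = List.map (fun p : Nat × Nat => ((p.1 : Int), (p.2 : Int))) (pvE l) := by
    conv_lhs => rw [hrange]
    rw [List.flatMap_map]
    have hstep : ∀ a : Nat,
        (((List.map (fun k : Nat => (k : Int)) (List.range l.length)).filter
            (fun j => decide ((a : Int) < j) && pvTest (PySem.List.pyGetD l (a : Int) (0, [])).2 (PySem.List.pyGetD l j (0, [])).2)).map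
            (fun j => ((a : Int), j)))
        = (((List.range l.length).filter (fun b => decide (a < b) && pvTest (pvVal l a) (pvVal l b))).map (fun b => (a, b))).map
            (fun p : Nat × Nat => ((p.1 : Int), (p.2 : Int))) := by
      intro a
      rw [hfilterZ a, List.map_map, List.map_map]
      rfl
    rw [List.flatMap_congr (fun a _ => hstep a), ← List.map_flatMap]
    congr 1
    rw [pvE, pvPairs_eq_flatMap _ List.pairwise_lt_range, List.filter_flatMap]
    apply List.flatMap_congr
    intro a _
    rw [List.filter_map]
    have : ((fun p => pvTest (pvVal l p.1) (pvVal l p.2)) ∘ (fun j => (a, j))) = fun b => pvTest (pvVal l a) (pvVal l b) := rfl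
    rw [this, List.filter_filter]
    congr 1
    apply List.filter_congr
    intro b _
    rw [Bool.and_comm]
  rw [hbigE, List.foldl_map]
  rw [pvCanon]
  congr 1
  apply PySem.List.foldl_congr_mem
  intro adj p _
  simp only [PySem.List.pyGetD_natCast, pvStep, pvKey]

theorem build_stabilizer_adjacency_A_canon (sm : List (Int × List Int)) :
    build_stabilizer_adjacency sm = pvCanon (PySem.Dict.ofList sm).items :=
  congrArg PySem.Dict.items (A_eq_canon (PySem.Dict.ofList sm) (PySem.Dict.nodup_keys_ofList sm))

theorem build_stabilizer_adjacency_B_canon (sm : List (Int × List Int)) :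
    build_stabilizer_adjacency_alt sm = pvCanon (PySem.Dict.ofList sm).items :=
  B_eq_canon (PySem.Dict.ofList sm).items

-- ===== VERDICT (by name: the statement is the Claim_ definition above) =====
theorem build_stabilizer_adjacency_spec : Claim_equal_build_stabilizer_adjacency := by
  intro stabilizer_map _
  unfold Spec_build_stabilizer_adjacency
  rw [build_stabilizer_adjacency_A_canon, build_stabilizer_adjacency_B_canon]
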